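-- pv_equiv track=rewrite | github.com/Lr-2002/coin | tools/plot_middle_step_categories.py | get_tasks_per_category
-- ===== SOURCE A (Python) =====
-- from collections import defaultdict
--
-- def normalize_task_name(task_name, to_format='hyphen'):
--     """Convert task name between formats with hyphens and underscores"""
--     if to_format == 'hyphen':
--         # Convert from underscore to hyphen
--         return task_name.replace('_', '-')
--     else:
--         # Convert from hyphen to underscore
--         return task_name.replace('-', '_')
--
-- def get_tasks_per_category(tags_data):
--     """Count how many tasks belong to each category"""
--     category_counts = defaultdict(int)
--     task_categories = defaultdict(list)
--
--     for task_name, task_tags in tags_data.items():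
--         # Also store underscore version of the task name for matching with normalized scores
--         underscore_task_name = normalize_task_name(task_name, to_format='underscore')
--
--         # Process object-centric categories
--         if 'obj' in task_tags:
--             for obj_tag in task_tags['obj']:
--                 category_counts[obj_tag] += 1
--                 task_categories[obj_tag].append(underscore_task_name)
--
--         # Process robot-centric categories
--         if 'rob' in task_tags:
--             for rob_tag in task_tags['rob']:
--                 category_counts[rob_tag] += 1
--                 task_categories[rob_tag].append(underscore_task_name)
--
--         # Process interactive categories
--         if 'iter' in task_tags:
--             for iter_tag in task_tags['iter']:
--                 category_counts[iter_tag] += 1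
--                 task_categories[iter_tag].append(underscore_task_name)
--
--     return category_counts, task_categories
-- ===== SOURCE B (Python) =====
-- from collections import defaultdict
--
-- def get_tasks_per_category(tags_data):
--     """Count how many tasks belong to each category"""
--     # Stage 1: flatten everything into one flat stream of (category, task) pairs.
--     pairs = [(tag, name.replace('-', '_'))
--              for name, tags in tags_data.items()
--              for sec in ('obj', 'rob', 'iter')
--              for tag in tags.get(sec, ())]
--     # Stage 2: category-major — for each category in first-appearance order,
--     # gather its tasks by scanning the flat stream; counts are the lengths.
--     groups = {cat: [n for t, n in pairs if t == cat]
--               for cat in dict.fromkeys(t for t, _ in pairs)}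
--     category_counts = defaultdict(int, {k: len(v) for k, v in groups.items()})
--     task_categories = defaultdict(list, groups)
--     return category_counts, task_categories
-- ===== Notes on version B (the rewrite author's own statement) =====
-- stated objective: alternative
-- what changed: A makes one task-major pass mutating a counter dict and a list dict per tag; B instead flattens everything into a flat (category, task) pair stream, then builds the result category-major: for each distinct category (first-appearance order) it collects its tasks by filtering the stream, and derives counts as lengths.
import Mathlib
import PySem

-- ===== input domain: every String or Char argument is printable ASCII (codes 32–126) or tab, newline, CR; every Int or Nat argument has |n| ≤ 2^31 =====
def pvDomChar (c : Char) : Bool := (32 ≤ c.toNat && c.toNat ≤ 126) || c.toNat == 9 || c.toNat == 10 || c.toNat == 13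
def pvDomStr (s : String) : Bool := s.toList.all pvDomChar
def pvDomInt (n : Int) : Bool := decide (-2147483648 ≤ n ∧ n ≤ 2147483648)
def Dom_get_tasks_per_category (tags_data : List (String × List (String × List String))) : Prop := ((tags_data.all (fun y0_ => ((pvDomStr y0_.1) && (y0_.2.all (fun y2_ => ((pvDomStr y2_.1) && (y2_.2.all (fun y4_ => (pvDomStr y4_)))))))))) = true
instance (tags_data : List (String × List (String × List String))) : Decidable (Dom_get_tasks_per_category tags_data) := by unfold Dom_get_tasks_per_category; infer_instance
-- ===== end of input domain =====

-- B replaces A's task-major mutating pass by a category-major construction: flatten to a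
-- flat (category, task) stream, then per distinct category filter its tasks; counts = lengths
-- (objective: alternative decomposition, no speed claim).

-- ===== PORT A =====
def normalize_task_name (task_name : String) (to_format : String) : String :=
  if to_format == "hyphen" then PySem.Str.replace task_name "_" "-"
  else PySem.Str.replace task_name "-" "_"

def get_tasks_per_category (tags_data : List (String × List (String × List String))) : (List (String × Int)) × (List (String × List String)) :=
  let st := tags_data.foldl (fun (st : PySem.Dict String Int × PySem.Dict String (List String)) t =>
    let task_tags := PySem.Dict.mk t.2
    let underscore_task_name := normalize_task_name t.1 "underscore"
    -- if 'obj' in task_tags: for obj_tag in task_tags['obj']: …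
    let st := if task_tags.contains "obj" then
        (task_tags.getD "obj" []).foldl (fun st g =>
          (st.1.modify g 0 (· + 1), st.2.modify g [] (· ++ [underscore_task_name]))) st
      else st
    let st := if task_tags.contains "rob" then
        (task_tags.getD "rob" []).foldl (fun st g =>
          (st.1.modify g 0 (· + 1), st.2.modify g [] (· ++ [underscore_task_name]))) st
      else st
    let st := if task_tags.contains "iter" then
        (task_tags.getD "iter" []).foldl (fun st g =>
          (st.1.modify g 0 (· + 1), st.2.modify g [] (· ++ [underscore_task_name]))) st
      else st
    st) (PySem.Dict.empty, PySem.Dict.empty)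
  (st.1.items, st.2.items)

-- ===== PORT B =====
def get_tasks_per_category_alt (tags_data : List (String × List (String × List String))) : (List (String × Int)) × (List (String × List String)) :=
  -- pairs = [(tag, name.replace('-','_')) for name,tags in … for sec in ('obj','rob','iter') for tag in tags.get(sec, ())]
  let pairs := tags_data.flatMap (fun t =>
    ((["obj", "rob", "iter"]).flatMap (fun sec => (PySem.Dict.mk t.2).getD sec [])).map
      (fun g => (g, PySem.Str.replace t.1 "-" "_")))
  -- groups = {cat: [n for t,n in pairs if t == cat] for cat in dict.fromkeys(t for t,_ in pairs)}:
  -- the comprehension runs over DISTINCT keys (dict.fromkeys = PySem.List.dedup), so the dict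
  -- it builds is exactly this association list in that order.
  let groups := (PySem.List.dedup (pairs.map (·.1))).map
    (fun k => (k, (pairs.filter (fun p => p.1 == k)).map (·.2)))
  -- category_counts = defaultdict(int, {k: len(v) …}); groups' keys are unique, so again a map.
  (groups.map (fun p => (p.1, (p.2.length : Int))), groups)

-- ===== PRECONDITION & SPEC =====
def Spec_get_tasks_per_category (tags_data : List (String × List (String × List String))) (out : (List (String × Int)) × (List (String × List String))) : Prop := out = get_tasks_per_category_alt tags_data
instance (tags_data : List (String × List (String × List String))) (out : (List (String × Int)) × (List (String × List String))) : Decidable (Spec_get_tasks_per_category tags_data out) := by unfold Spec_get_tasks_per_category; infer_instance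

-- ===== CLAIM (what is proved, stated in full; the proofs are below) =====
def Claim_equal_get_tasks_per_category : Prop := ∀ (tags_data : List (String × List (String × List String))), Dom_get_tasks_per_category tags_data → Spec_get_tasks_per_category tags_data (get_tasks_per_category tags_data)

-- ===== LEMMAS AND PROOFS =====

-- the tags of one task in A's visiting order, and the flattened (tag, name) pairs
def tagsOf (tt : List (String × List String)) : List String :=
  (PySem.Dict.mk tt).getD "obj" [] ++ (PySem.Dict.mk tt).getD "rob" [] ++ (PySem.Dict.mk tt).getD "iter" []

def pairsOf (tags_data : List (String × List (String × List String))) : List (String × String) :=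
  tags_data.flatMap (fun t => (tagsOf t.2).map (fun g => (g, PySem.Str.replace t.1 "-" "_")))

def cntOf (tags_data : List (String × List (String × List String))) : PySem.Dict String Int :=
  (pairsOf tags_data).foldl (fun d p => d.modify p.1 0 (· + 1)) PySem.Dict.empty

def grpOf (tags_data : List (String × List (String × List String))) : PySem.Dict String (List String) :=
  (pairsOf tags_data).foldl (fun d p => d.modify p.1 [] (· ++ [p.2])) PySem.Dict.empty

-- splitting one simultaneous (counts, groups) fold of A into its two components
theorem step_pair (l : List String) (u : String)
    (c : PySem.Dict String Int) (gd : PySem.Dict String (List String)) :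
    l.foldl (fun st g => (st.1.modify g 0 (· + 1), st.2.modify g [] (· ++ [u]))) (c, gd)
      = (l.foldl (fun d x => d.modify x 0 (· + 1)) c,
         l.foldl (fun d x => d.modify x [] (· ++ [u])) gd) :=
  PySem.List.foldl_prod_mk (fun d x => d.modify x 0 (· + 1))
    (fun d x => d.modify x [] (· ++ [u])) l c gd

-- one guarded block of A equals an unguarded fold (missing key ⇒ empty tag list)
theorem guard_fold {σ : Type} (tt : PySem.Dict String (List String)) (k : String)
    (f : σ → String → σ) (st : σ) :
    (if tt.contains k then (tt.getD k []).foldl f st else st) = (tt.getD k []).foldl f st := by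
  cases h : tt.contains k with
  | true => simp
  | false => simp [PySem.Dict.getD_of_not_contains tt [] h]

-- A's loop over the tasks, with both accumulators generalized, as two flat folds over pairsOf
theorem a_loop (td : List (String × List (String × List String)))
    (c : PySem.Dict String Int) (g : PySem.Dict String (List String)) :
    td.foldl (fun (st : PySem.Dict String Int × PySem.Dict String (List String)) t =>
      let task_tags := PySem.Dict.mk t.2
      let underscore_task_name := normalize_task_name t.1 "underscore"
      let st := if task_tags.contains "obj" then
          (task_tags.getD "obj" []).foldl (fun st g =>
            (st.1.modify g 0 (· + 1), st.2.modify g [] (· ++ [underscore_task_name]))) st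
        else st
      let st := if task_tags.contains "rob" then
          (task_tags.getD "rob" []).foldl (fun st g =>
            (st.1.modify g 0 (· + 1), st.2.modify g [] (· ++ [underscore_task_name]))) st
        else st
      let st := if task_tags.contains "iter" then
          (task_tags.getD "iter" []).foldl (fun st g =>
            (st.1.modify g 0 (· + 1), st.2.modify g [] (· ++ [underscore_task_name]))) st
        else st
      st) (c, g)
    = ((pairsOf td).foldl (fun d p => d.modify p.1 0 (· + 1)) c,
       (pairsOf td).foldl (fun d p => d.modify p.1 [] (· ++ [p.2])) g) := by
  induction td generalizing c g with
  | nil => simp [pairsOf]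
  | cons t rest ih =>
    simp only [List.foldl_cons, pairsOf, List.flatMap_cons, List.foldl_append,
      List.foldl_map] at ih ⊢
    rw [show normalize_task_name t.1 "underscore" = PySem.Str.replace t.1 "-" "_" by
      simp [normalize_task_name]]
    simp only [guard_fold] at ih ⊢
    rw [tagsOf]
    simp only [List.foldl_append, step_pair]
    exact ih _ _

theorem a_norm (td : List (String × List (String × List String))) :
    get_tasks_per_category td = ((cntOf td).items, (grpOf td).items) := by
  unfold get_tasks_per_category cntOf grpOf
  rw [a_loop]

-- B's flat pair stream IS pairsOf (the three-section flatMap is tagsOf's append)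
theorem b_pairs (td : List (String × List (String × List String))) :
    td.flatMap (fun t =>
      ((["obj", "rob", "iter"]).flatMap (fun sec => (PySem.Dict.mk t.2).getD sec [])).map
        (fun g => (g, PySem.Str.replace t.1 "-" "_")))
    = pairsOf td := by
  unfold pairsOf tagsOf
  simp

theorem b_norm (td : List (String × List (String × List String))) :
    get_tasks_per_category_alt td
      = (((PySem.Set.ofList ((pairsOf td).map (·.1))).map
            (fun k => (k, ((pairsOf td).filter (fun p => p.1 == k)).map (·.2)))).map
            (fun p => (p.1, (p.2.length : Int))),
         (PySem.Set.ofList ((pairsOf td).map (·.1))).map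
            (fun k => (k, ((pairsOf td).filter (fun p => p.1 == k)).map (·.2)))) := by
  unfold get_tasks_per_category_alt
  simp only [b_pairs td, PySem.List.dedup_eq_ofList]

-- A's two result dicts, rendered as maps over the distinct categories: counts via Counter,
-- groups via the modify-append characterisation.
theorem a_items (td : List (String × List (String × List String))) :
    get_tasks_per_category td
      = (((PySem.Set.ofList ((pairsOf td).map (·.1))).map
            (fun k => (k, ((pairsOf td).filter (fun p => p.1 == k)).map (·.2)))).map
            (fun p => (p.1, (p.2.length : Int))),
         (PySem.Set.ofList ((pairsOf td).map (·.1))).map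
            (fun k => (k, ((pairsOf td).filter (fun p => p.1 == k)).map (·.2)))) := by
  have hc : cntOf td = PySem.Dict.counter ((pairsOf td).map (fun p => p.1)) := by
    rw [PySem.Dict.counter_eq_foldl, List.foldl_map]
    rfl
  have hnd : (grpOf td).keys.Nodup := by
    unfold grpOf
    exact PySem.Dict.nodup_keys_foldl_modify_key (pairsOf td)
      (fun (p : String × String) => p.1) []
      (fun _ (p : String × String) (v : List String) => v ++ [p.2]) PySem.Dict.empty
      (by simp)
  have hkeys : (grpOf td).keys = PySem.Set.ofList ((pairsOf td).map (fun p => p.1)) := by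
    unfold grpOf
    rw [PySem.Dict.keys_foldl_modify_key (pairsOf td) (fun (p : String × String) => p.1) []
      (fun _ (p : String × String) (v : List String) => v ++ [p.2])]
    simp [PySem.Dict.keys_empty, PySem.Set.update_nil_left]
  have hg : ∀ k, (grpOf td).getD k [] = ((pairsOf td).filter (fun p => p.1 == k)).map (fun p => p.2) := by
    intro k
    unfold grpOf
    rw [PySem.Dict.getD_foldl_modify_append]
    simp [PySem.Dict.getD_empty]
  have hcount : ∀ k, (((pairsOf td).map (fun p => p.1)).count k : Int)
      = (((pairsOf td).filter (fun p => p.1 == k)).length : Int) := by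
    intro k
    congr 1
    rw [List.count_eq_countP, List.countP_map, List.countP_eq_length_filter]
    rfl
  have hgrp : (grpOf td).items
      = (PySem.Set.ofList ((pairsOf td).map (·.1))).map
          (fun k => (k, ((pairsOf td).filter (fun p => p.1 == k)).map (·.2))) := by
    rw [PySem.Dict.items_eq_map_keys (grpOf td) hnd [], hkeys]
    apply List.map_congr_left
    intro k _
    simp only [hg k]
  rw [a_norm, hgrp]
  congr 1
  rw [hc, PySem.Dict.items_counter, List.map_map]
  apply List.map_congr_left
  intro k _
  simp only [Function.comp_def, List.length_map, hcount k]

-- ===== VERDICT (by name: the statement is the Claim_ definition above) =====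
theorem get_tasks_per_category_spec : Claim_equal_get_tasks_per_category := by
  intro td _
  unfold Spec_get_tasks_per_category
  rw [a_items, b_norm]
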